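-- pv_equiv track=rewrite | github.com/geneeuchoi/Algorithm | 백준/Silver/3085. 사탕 게임/사탕 게임.py | findMaxCnt
-- ===== SOURCE A (Python) =====
-- def findMaxCnt(N, rectangle):
--     maxCntList = []
--     # 행
--     for i in range(N):
--         maxCnt = 1
--         for j in range(1, N):
--             if rectangle[i][j] == rectangle[i][j - 1]:
--                 maxCnt += 1
--             else:
--                 maxCntList.append(maxCnt)
--                 maxCnt = 1
--         maxCntList.append(maxCnt)
--
--   # 열 검사
--     for j in range(N):
--         maxCnt = 1
--         for i in range(1, N):
--             if rectangle[i][j] == rectangle[i - 1][j]: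
--                 maxCnt += 1
--             else:
--                 maxCntList.append(maxCnt)
--                 maxCnt = 1
--         maxCntList.append(maxCnt)
--
--     return max(maxCntList)
-- ===== SOURCE B (Python) =====
-- def findMaxCnt(N, rectangle):
--     rows = [[rectangle[i][j] for j in range(N)] for i in range(N)]
--
--     def longest(line):
--         bounds = [0] + [k for k in range(1, N) if line[k] != line[k - 1]] + [N]
--         return max(b - a for a, b in zip(bounds, bounds[1:]))
--
--     return max(longest(line) for line in rows + [list(c) for c in zip(*rows)])
-- ===== Notes on version B (the rewrite author's own statement) =====
-- stated objective: alternative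
-- what changed: B characterizes runs by their boundaries instead of counting them: for each line (rows plus the zip(*rows) transpose) it collects the breakpoint indices where the line changes, brackets them with 0 and N, takes the maximum difference of consecutive boundaries, and returns the max of these per-line maxima, whereas A maintains a running counter in nested index loops and flattens every run length of every row and column into one list before calling max.
-- outside the precondition, e.g. on findMaxCnt(1, []): A returns 1, B raises IndexError; on findMaxCnt(1, [[]]): A returns 1, B raises IndexError
import Mathlib
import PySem

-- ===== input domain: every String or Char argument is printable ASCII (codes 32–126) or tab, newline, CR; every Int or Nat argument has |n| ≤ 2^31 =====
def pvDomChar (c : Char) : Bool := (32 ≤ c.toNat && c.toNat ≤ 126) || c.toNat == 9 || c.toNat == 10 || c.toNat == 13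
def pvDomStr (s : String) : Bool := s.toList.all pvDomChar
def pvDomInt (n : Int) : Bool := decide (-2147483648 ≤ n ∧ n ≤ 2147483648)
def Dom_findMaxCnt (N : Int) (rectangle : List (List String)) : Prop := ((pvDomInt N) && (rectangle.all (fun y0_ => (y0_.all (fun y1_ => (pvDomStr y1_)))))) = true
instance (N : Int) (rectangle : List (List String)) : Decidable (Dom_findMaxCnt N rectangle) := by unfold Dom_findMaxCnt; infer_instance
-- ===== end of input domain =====

-- B replaces A's running-counter nested index loops (which flatten every run length into one
-- list and max at the end) by a boundary view: per line (rows + zip(*rows) transpose) it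
-- collects the breakpoint indices where the line changes, brackets them with 0 and N, and
-- maxes the differences of consecutive boundaries.  Same cost, different characterization.

-- ===== PORT A =====
def findMaxCnt (N : Int) (rectangle : List (List String)) : Int :=
  -- cell i j = rectangle[i][j]; in range whenever Pre_ holds (Python raises IndexError otherwise)
  let cell : Int → Int → String := fun i j =>
    PySem.List.pyGetD (PySem.List.pyGetD rectangle i []) j ""
  -- 행 (row pass)
  let s1 : List Int := (PySem.List.pyRange 0 N 1).foldl (fun acc i =>
    let st := (PySem.List.pyRange 1 N 1).foldl (fun (p : List Int × Int) j =>
      if cell i j == cell i (j - 1) then (p.1, p.2 + 1) else (p.1 ++ [p.2], 1)) (acc, 1)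
    st.1 ++ [st.2]) []
  -- 열 검사 (column pass)
  let s2 : List Int := (PySem.List.pyRange 0 N 1).foldl (fun acc j =>
    let st := (PySem.List.pyRange 1 N 1).foldl (fun (p : List Int × Int) i =>
      if cell i j == cell (i - 1) j then (p.1, p.2 + 1) else (p.1 ++ [p.2], 1)) (acc, 1)
    st.1 ++ [st.2]) s1
  -- max(maxCntList); nonempty under Pre_ (Python raises ValueError on an empty list)
  (PySem.List.max? s2 (fun x => x)).getD 0

-- ===== PORT B =====
-- zip(*rows): transpose truncated to the shortest row (what Python's zip does)
def pvZipStarLen (rows : List (List String)) : Nat :=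
  match rows with
  | [] => 0
  | r :: rs => rs.foldl (fun m r' => min m r'.length) r.length

def pvZipStar (rows : List (List String)) : List (List String) :=
  (List.range (pvZipStarLen rows)).map (fun j => rows.map (fun r => r.getD j ""))

def findMaxCnt_alt (N : Int) (rectangle : List (List String)) : Int :=
  -- rows = [[rectangle[i][j] for j in range(N)] for i in range(N)]
  let rows := (PySem.List.pyRange 0 N 1).map (fun i =>
    (PySem.List.pyRange 0 N 1).map (fun j =>
      PySem.List.pyGetD (PySem.List.pyGetD rectangle i []) j ""))
  let longest : List String → Int := fun line =>
    -- bounds = [0] + [k for k in range(1, N) if line[k] != line[k-1]] + [N]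
    let bounds : List Int :=
      0 :: (PySem.List.pyRange 1 N 1).filter (fun k =>
        !(PySem.List.pyGetD line k "" == PySem.List.pyGetD line (k - 1) "")) ++ [N]
    -- max(b - a for a, b in zip(bounds, bounds[1:])): nonempty since bounds has ≥ 2 elements
    (PySem.List.max?
      ((bounds.zip (PySem.List.slice bounds (some 1) none)).map (fun p => p.2 - p.1))
      (fun x => x)).getD 0
  -- max over the per-line maxima; nonempty under Pre_ (Python raises ValueError on an empty grid)
  (PySem.List.max? ((rows ++ pvZipStar rows).map longest) (fun x => x)).getD 0

-- ===== PRECONDITION & SPEC =====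
-- Pre_ excludes the inputs where Python A raises — N ≤ 0 (max([]) is a ValueError) and, for
-- N ≥ 2, grids without N rows of at least N cells each (rectangle[i][j] is an IndexError) —
-- and also the degenerate N = 1 grids missing the first cell, where A returns 1 without ever
-- touching the grid while B's natural N×N read raises IndexError.
def Pre_findMaxCnt (N : Int) (rectangle : List (List String)) : Prop :=
  1 ≤ N ∧ N ≤ (rectangle.length : Int) ∧
    ∀ row ∈ rectangle.take N.toNat, N ≤ (row.length : Int)
instance (N : Int) (rectangle : List (List String)) : Decidable (Pre_findMaxCnt N rectangle) := by
  unfold Pre_findMaxCnt; infer_instance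

def pvWitness_findMaxCnt : Int × List (List String) := (2, [["a", "b"], ["b", "b"]])

def Spec_findMaxCnt (N : Int) (rectangle : List (List String)) (out : Int) : Prop := out = findMaxCnt_alt N rectangle
instance (N : Int) (rectangle : List (List String)) (out : Int) : Decidable (Spec_findMaxCnt N rectangle out) := by unfold Spec_findMaxCnt; infer_instance

-- ===== CLAIM (what is proved, stated in full; the proofs are below) =====
def Claim_equal_findMaxCnt : Prop := ∀ (N : Int) (rectangle : List (List String)), Dom_findMaxCnt N rectangle → Pre_findMaxCnt N rectangle → Spec_findMaxCnt N rectangle (findMaxCnt N rectangle)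

-- ===== LEMMAS AND PROOFS =====

-- A's inner-loop body, as a function of the pair (prev, x)
def pvStepA (p : List Int × Int) (pr : String × String) : List Int × Int :=
  if pr.2 == pr.1 then (p.1, p.2 + 1) else (p.1 ++ [p.2], 1)

-- run lengths of a line, starting with a current count m
def pvRunsFrom (ps : List (String × String)) (m : Int) : List Int :=
  (ps.foldl pvStepA ([], m)).1 ++ [(ps.foldl pvStepA ([], m)).2]

def pvRuns (line : List String) : List Int := pvRunsFrom (line.zip line.tail) 1

-- breakpoint indices (B's view): positions i, i+1, … of the pairs that differ
def pvCutsZ : List (String × String) → Int → List Int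
  | [], _ => []
  | pr :: ps, i => if pr.2 == pr.1 then pvCutsZ ps (i + 1) else i :: pvCutsZ ps (i + 1)

-- differences of consecutive boundaries
def pvGapsFrom : Int → List Int → List Int
  | _, [] => []
  | a, b :: bs => (b - a) :: pvGapsFrom b bs

-- per-line value B computes = max of the line's run lengths
def pvVal (line : List String) : Int :=
  (PySem.List.max? (pvRuns line) (fun x => x)).getD 0

-- the first n rows, each truncated to n cells
def pvRows (n : Nat) (rect : List (List String)) : List (List String) :=
  (rect.take n).map (fun r => r.take n)

-- the n columns of the truncated grid
def pvCols (n : Nat) (rect : List (List String)) : List (List String) :=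
  (List.range n).map (fun j => (pvRows n rect).map (fun r => r.getD j ""))

-- the accumulator of A's inner loop only grows by appending
lemma pvStepA_acc (ps : List (String × String)) : ∀ (acc : List Int) (m : Int),
    ps.foldl pvStepA (acc, m)
      = (acc ++ (ps.foldl pvStepA ([], m)).1, (ps.foldl pvStepA ([], m)).2) := by
  induction ps with
  | nil => intro acc m; simp
  | cons pr ps ih =>
    intro acc m
    simp only [List.foldl_cons, pvStepA]
    by_cases h : (pr.2 == pr.1) = true
    · rw [if_pos h, if_pos h, ih acc (m + 1)]
    · rw [if_neg h, if_neg h, ih (acc ++ [m]) 1, ih ([] ++ [m]) 1]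
      simp

lemma pvRunsFrom_cons (pr : String × String) (ps : List (String × String)) (m : Int) :
    pvRunsFrom (pr :: ps) m
      = if (pr.2 == pr.1) = true then pvRunsFrom ps (m + 1) else m :: pvRunsFrom ps 1 := by
  by_cases h : (pr.2 == pr.1) = true
  · simp only [pvRunsFrom, List.foldl_cons, pvStepA, if_pos h]
  · simp only [pvRunsFrom, List.foldl_cons, pvStepA, if_neg h]
    rw [pvStepA_acc ps ([] ++ [m]) 1]
    simp

lemma pvRunsFrom_head (ps : List (String × String)) : ∀ m : Int,
    ∃ h t, pvRunsFrom ps m = h :: t ∧ m ≤ h := by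
  induction ps with
  | nil => intro m; exact ⟨m, [], by simp [pvRunsFrom], le_refl m⟩
  | cons pr ps ih =>
    intro m
    by_cases h : (pr.2 == pr.1) = true
    · obtain ⟨x, t, hxt, hle⟩ := ih (m + 1)
      refine ⟨x, t, ?_, by omega⟩
      rw [pvRunsFrom_cons, if_pos h, hxt]
    · exact ⟨m, pvRunsFrom ps 1, by rw [pvRunsFrom_cons, if_neg h], le_refl m⟩

lemma pvFoldMax_max (l : List Int) : ∀ a b : Int,
    l.foldl max (max a b) = max a (l.foldl max b) := by
  induction l with
  | nil => intro a b; rfl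
  | cons x l ih =>
    intro a b
    simp only [List.foldl_cons]
    rw [max_assoc, ih]

-- B's gap list over [0]+cuts+[N] is exactly A's run-length list
lemma pvGaps_runs (ps : List (String × String)) : ∀ (i a : Int),
    pvGapsFrom a (pvCutsZ ps i ++ [i + (ps.length : Int)]) = pvRunsFrom ps (i - a) := by
  induction ps with
  | nil =>
    intro i a
    simp [pvCutsZ, pvGapsFrom, pvRunsFrom]
  | cons pr ps ih =>
    intro i a
    have hlen : i + ((pr :: ps).length : Int) = (i + 1) + (ps.length : Int) := by
      push_cast [List.length_cons]; ring
    rw [hlen, pvRunsFrom_cons]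
    by_cases h : (pr.2 == pr.1) = true
    · rw [if_pos h]
      simp only [pvCutsZ, if_pos h]
      rw [ih (i + 1) a]
      congr 1
      ring
    · rw [if_neg h]
      simp only [pvCutsZ, if_neg h, List.cons_append, pvGapsFrom]
      rw [ih (i + 1) i]
      congr 1
      ring

-- zip(bounds, bounds[1:]) differences = pvGapsFrom
lemma pvZipGaps (bs : List Int) : ∀ a : Int,
    (((a :: bs).zip bs).map (fun p : Int × Int => p.2 - p.1)) = pvGapsFrom a bs := by
  induction bs with
  | nil => intro a; simp [pvGapsFrom]
  | cons b bs ih =>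
    intro a
    simp only [List.zip_cons_cons, List.map_cons, pvGapsFrom]
    rw [ih b]

-- the indexed filter over range, shifted by a, is pvCutsZ
lemma pvCuts_range (t : List String) : ∀ (x : String) (a : Nat),
    (((List.range t.length).filter
        (fun k => !((x :: t).getD (k + 1) "" == (x :: t).getD k ""))).map
      (fun k => ((a + 1 + k : Nat) : Int)))
    = pvCutsZ ((x :: t).zip t) ((a : Int) + 1) := by
  induction t with
  | nil => intro x a; simp [pvCutsZ]
  | cons y t ih =>
    intro x a
    have hfm : (((List.range t.length).map Nat.succ).filter
          (fun k => !((x :: y :: t).getD (k + 1) "" == (x :: y :: t).getD k "")))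
        = ((List.range t.length).filter
          (fun k => !((y :: t).getD (k + 1) "" == (y :: t).getD k ""))).map Nat.succ := by
      rw [List.filter_map]
      exact congrArg _ (List.filter_congr (fun k _ => by simp [Function.comp]))
    have hmc : (((List.range t.length).filter
          (fun k => !((y :: t).getD (k + 1) "" == (y :: t).getD k ""))).map Nat.succ).map
          (fun k => ((a + 1 + k : Nat) : Int))
        = pvCutsZ ((y :: t).zip t) (((a : Int) + 1) + 1) := by
      rw [List.map_map]
      have hmc2 : ((List.range t.length).filter
            (fun k => !((y :: t).getD (k + 1) "" == (y :: t).getD k ""))).map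
            ((fun k => ((a + 1 + k : Nat) : Int)) ∘ Nat.succ)
          = ((List.range t.length).filter
            (fun k => !((y :: t).getD (k + 1) "" == (y :: t).getD k ""))).map
            (fun k => (((a + 1) + 1 + k : Nat) : Int)) :=
        List.map_congr_left (fun k _ => by simp only [Function.comp]; congr 1; omega)
      rw [hmc2, ih y (a + 1)]
      congr 1
    rw [List.length_cons, List.range_succ_eq_map, List.filter_cons]
    by_cases h : (y == x) = true
    · have hb : (!((x :: y :: t).getD (0 + 1) "" == (x :: y :: t).getD 0 "")) = false := by
        simp [h]
      rw [hb]
      simp only [Bool.false_eq_true, if_false]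
      rw [hfm, hmc]
      simp [pvCutsZ, h]
    · have hb : (!((x :: y :: t).getD (0 + 1) "" == (x :: y :: t).getD 0 "")) = true := by
        simp [h]
      rw [hb, if_pos rfl, hfm, List.map_cons, hmc]
      have ha : ((a + 1 + 0 : Nat) : Int) = (a : Int) + 1 := by push_cast; ring
      rw [ha]
      simp [pvCutsZ, h]

lemma pvPyRange_shift (a : Nat) : ∀ (n : Nat),
    PySem.List.pyRange (a : Int) ((a : Int) + (n : Int)) 1
      = (List.range n).map (fun k => ((a + k : Nat) : Int)) := by
  intro n
  induction n with
  | zero => simp [PySem.List.pyRange]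
  | succ n ih =>
    have : ((a : Int) + ((n : Nat) + 1 : Nat)) = ((a : Int) + (n : Int)) + 1 := by push_cast; ring
    rw [this, PySem.List.pyRange_one_succ_right (by omega), ih, List.range_succ]
    simp

-- B's filter over pyRange(1, len) with an Int accessor = pvCutsZ over the zipped line
lemma pvCutsIdx (line : List String) (f : Int → String)
    (hf : ∀ k : Nat, k < line.length → f (k : Int) = line.getD k "") :
    (PySem.List.pyRange 1 (line.length : Int) 1).filter (fun k => !(f k == f (k - 1)))
      = pvCutsZ (line.zip line.tail) 1 := by
  cases line with
  | nil => simp [PySem.List.pyRange, pvCutsZ]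
  | cons x t =>
    have h1 : ((x :: t).length : Int) = (1 : Int) + (t.length : Int) := by
      simp [List.length_cons]; omega
    rw [h1]
    have hsh := pvPyRange_shift 1 t.length
    simp only [Nat.cast_one] at hsh
    rw [hsh, List.filter_map]
    have hcg : (List.range t.length).filter
          ((fun k => !(f k == f (k - 1))) ∘ (fun k : Nat => ((1 + k : Nat) : Int)))
        = (List.range t.length).filter
          (fun k => !((x :: t).getD (k + 1) "" == (x :: t).getD k "")) := by
      apply List.filter_congr
      intro k hk
      have hklt : k < t.length := List.mem_range.mp hk
      simp only [Function.comp]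
      have e1 : ((1 + k : Nat) : Int) - 1 = ((k : Nat) : Int) := by push_cast; ring
      have e2 : f ((1 + k : Nat) : Int) = (x :: t).getD (k + 1) "" := by
        rw [hf (1 + k) (by simp [List.length_cons]; omega)]
        congr 1
        omega
      rw [e1, e2, hf k (by simp [List.length_cons]; omega)]
    rw [hcg]
    simp only [List.tail_cons]
    have := pvCuts_range t x 0
    simp only [Nat.cast_zero, zero_add] at this
    rw [← this]

-- B's inner max over gap differences = max of the line's run lengths
lemma pvLineVal (line : List String) (f : Int → String) (hne : line ≠ [])
    (hf : ∀ k : Nat, k < line.length → f (k : Int) = line.getD k "") :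
    (PySem.List.max?
        (((((0 : Int) :: (PySem.List.pyRange 1 (line.length : Int) 1).filter
              (fun k => !(f k == f (k - 1))) ++ [(line.length : Int)])).zip
          (PySem.List.slice
            ((0 : Int) :: (PySem.List.pyRange 1 (line.length : Int) 1).filter
              (fun k => !(f k == f (k - 1))) ++ [(line.length : Int)]) (some 1) none)).map
          (fun p => p.2 - p.1))
        (fun x => x)).getD 0 = pvVal line := by
  rw [PySem.List.slice_from_one]
  cases line with
  | nil => exact absurd rfl hne
  | cons x t =>
    rw [pvCutsIdx (x :: t) f hf]
    simp only [List.tail_cons, List.cons_append]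
    rw [pvZipGaps]
    have hl : ((x :: t).length : Int) = 1 + (((x :: t).zip t).length : Int) := by
      simp [List.length_cons, List.length_zip]
      omega
    rw [hl, pvGaps_runs ((x :: t).zip t) 1 0]
    have : (1 : Int) - 0 = 1 := by ring
    rw [this]
    rfl

lemma pvVal_eq_foldl (line : List String) :
    ∃ h t, pvRuns line = h :: t ∧ 1 ≤ h ∧ pvVal line = t.foldl max h := by
  obtain ⟨h, t, hht, h1⟩ := pvRunsFrom_head (line.zip line.tail) 1
  exact ⟨h, t, hht, h1, by
    simp only [pvVal, pvRuns]
    rw [hht, PySem.List.max?_id_cons]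
    rfl⟩

-- folding max over the flattened runs = B's per-line fold
lemma pvFoldRuns (L : List (List String)) : ∀ b : Int,
    (L.flatMap pvRuns).foldl max b = L.foldl (fun best l => max best (pvVal l)) b := by
  induction L with
  | nil => intro b; rfl
  | cons l L ih =>
    intro b
    obtain ⟨h, t, hht, _h1, hval⟩ := pvVal_eq_foldl l
    simp only [List.flatMap_cons, List.foldl_cons]
    rw [List.foldl_append, hht]
    simp only [List.foldl_cons]
    rw [pvFoldMax_max t b h, ← hval, ih]

lemma pvFinal (L : List (List String)) (hL : L ≠ []) :
    (PySem.List.max? (L.flatMap pvRuns) (fun x => x)).getD 0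
      = (PySem.List.max? (L.map pvVal) (fun x => x)).getD 0 := by
  cases L with
  | nil => exact absurd rfl hL
  | cons l0 ls =>
    obtain ⟨h, t, hht, _h1, hval⟩ := pvVal_eq_foldl l0
    rw [List.flatMap_cons, hht, List.cons_append, PySem.List.max?_id_cons,
      List.map_cons, PySem.List.max?_id_cons]
    simp only [Option.getD_some]
    rw [List.foldl_append, ← hval, pvFoldRuns ls (pvVal l0), List.foldl_map]

-- map over range with getD = take
lemma pvMapRange_take {α : Type} (l : List α) (n : Nat) (d : α) (h : n ≤ l.length) :
    (List.range n).map (fun k => l.getD k d) = l.take n := by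
  apply List.ext_getElem
  · simp; omega
  · intro i h1 h2
    simp only [List.getElem_map, List.getElem_range, List.getElem_take]
    rw [List.getD_eq_getElem?_getD, List.getElem?_eq_getElem (by simp at h1; omega)]
    rfl

lemma pvFoldMin_const (n : Nat) (rs : List (List String)) :
    (∀ r ∈ rs, r.length = n) → rs.foldl (fun m r' => min m r'.length) n = n := by
  induction rs with
  | nil => intro _; rfl
  | cons r' rs' ih =>
    intro h
    simp only [List.foldl_cons, h r' List.mem_cons_self, min_self]
    exact ih (fun r hr => h r (List.mem_cons_of_mem _ hr))

lemma pvZipStarLen_const (rows : List (List String)) (n : Nat) (h0 : rows ≠ [])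
    (h : ∀ r ∈ rows, r.length = n) : pvZipStarLen rows = n := by
  cases rows with
  | nil => exact absurd rfl h0
  | cons r rs =>
    simp only [pvZipStarLen]
    rw [h r List.mem_cons_self]
    exact pvFoldMin_const n rs (fun r' hr' => h r' (List.mem_cons_of_mem _ hr'))

lemma pvGetD_take {α : Type} (l : List α) (n m : Nat) (d : α) (hm : m < n) :
    (l.take n).getD m d = l.getD m d := by
  simp [List.getD_eq_getElem?_getD, hm]

lemma pvGetD_map {α β : Type} (g : α → β) (l : List α) (k : Nat) (d : β) (hk : k < l.length) :
    (l.map g).getD k d = g (l[k]) := by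
  simp [List.getD_eq_getElem?_getD, List.getElem?_eq_getElem hk]

lemma pvGetD_getElem {α : Type} (l : List α) (k : Nat) (d : α) (hk : k < l.length) :
    l.getD k d = l[k] := by
  simp [List.getD_eq_getElem?_getD, List.getElem?_eq_getElem hk]

lemma pvRows_length (n : Nat) (rect : List (List String)) (h2 : n ≤ rect.length) :
    (pvRows n rect).length = n := by
  simp [pvRows]; omega

lemma pvRows_all_len (n : Nat) (rect : List (List String))
    (h3 : ∀ r ∈ rect.take n, n ≤ r.length) :
    ∀ r ∈ pvRows n rect, r.length = n := by
  intro r hr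
  obtain ⟨r', hr', rfl⟩ := List.mem_map.mp hr
  have := h3 r' hr'
  simp [List.length_take]; omega

lemma pvRows_ne_nil (n : Nat) (rect : List (List String)) (h1' : 1 ≤ n) (h2 : n ≤ rect.length) :
    pvRows n rect ≠ [] := by
  intro hc
  have := pvRows_length n rect h2
  rw [hc] at this; simp at this; omega

lemma pvRowLen (n : Nat) (rect : List (List String)) (k : Nat) (h2 : n ≤ rect.length)
    (h3 : ∀ r ∈ rect.take n, n ≤ r.length) (hk : k < n) :
    n ≤ (rect.getD k []).length := by
  have hkr : k < rect.length := lt_of_lt_of_le hk h2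
  have hmem : rect[k] ∈ rect.take n := by
    have : (rect.take n)[k]'(by simp; omega) = rect[k] := List.getElem_take
    rw [← this]
    exact List.getElem_mem _
  rw [pvGetD_getElem rect k [] hkr]
  exact h3 _ hmem

lemma pvRangeRows (n : Nat) (rect : List (List String)) (h2 : n ≤ rect.length) :
    (List.range n).map (fun k => (rect.getD k []).take n) = pvRows n rect := by
  have hm : (List.range n).map (fun k => (rect.getD k []).take n)
      = ((List.range n).map (fun k => rect.getD k [])).map (fun r => r.take n) := by
    rw [List.map_map]; rfl
  rw [hm, pvMapRange_take rect n [] h2]; rfl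

lemma pvLineRow_length (n : Nat) (rect : List (List String)) (k : Nat)
    (h2 : n ≤ rect.length) (h3 : ∀ r ∈ rect.take n, n ≤ r.length) (hk : k < n) :
    ((rect.getD k []).take n).length = n := by
  have := pvRowLen n rect k h2 h3 hk
  rw [List.length_take]; omega

-- every line B iterates over has length n
lemma pvLines_len (n : Nat) (rect : List (List String)) (h2 : n ≤ rect.length)
    (h3 : ∀ r ∈ rect.take n, n ≤ r.length) :
    ∀ l ∈ pvRows n rect ++ pvCols n rect, l.length = n := by
  intro l hl
  rcases List.mem_append.mp hl with hl | hl
  · exact pvRows_all_len n rect h3 l hl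
  · obtain ⟨j, _, rfl⟩ := List.mem_map.mp hl
    rw [List.length_map]
    exact pvRows_length n rect h2

lemma pvAlt_eq (n : Nat) (rect : List (List String)) (h1 : 1 ≤ n) (h2 : n ≤ rect.length)
    (h3 : ∀ r ∈ rect.take n, n ≤ r.length) :
    findMaxCnt_alt (n : Int) rect
      = (PySem.List.max? ((pvRows n rect ++ pvCols n rect).map pvVal) (fun x => x)).getD 0 := by
  simp only [findMaxCnt_alt, PySem.List.pyRange_zero_natCast, List.map_map, Function.comp_def,
    PySem.List.pyGetD_natCast]
  have hrows : ∀ i ∈ List.range n,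
      (List.range n).map (fun j => (rect.getD i []).getD j "") = (rect.getD i []).take n :=
    fun i hi => pvMapRange_take _ n "" (pvRowLen n rect i h2 h3 (List.mem_range.mp hi))
  rw [List.map_congr_left hrows, pvRangeRows n rect h2]
  have hz : pvZipStar (pvRows n rect) = pvCols n rect := by
    rw [pvZipStar, pvZipStarLen_const (pvRows n rect) n (pvRows_ne_nil n rect h1 h2)
      (pvRows_all_len n rect h3), pvCols]
  rw [hz]
  refine congrArg (fun l => (PySem.List.max? l (fun x => x)).getD 0) ?_
  apply List.map_congr_left
  intro line hline
  have hlen : line.length = n := pvLines_len n rect h2 h3 line hline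
  have hne : line ≠ [] := by
    intro hc; rw [hc] at hlen; simp at hlen; omega
  have hN : (n : Int) = (line.length : Int) := by rw [hlen]
  rw [hN]
  exact pvLineVal line (fun k => PySem.List.pyGetD line k "") hne
    (fun k hk => by simp only [PySem.List.pyGetD_natCast])

-- index-driven fold over range(len-1) = fold over zip(line, line[1:])
lemma pvFold_range_zip (t : List String) : ∀ (x : String) (st : List Int × Int),
    (List.range t.length).foldl
        (fun p k => pvStepA p ((x :: t).getD k "", (x :: t).getD (k + 1) "")) st
      = ((x :: t).zip t).foldl pvStepA st := by
  induction t with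
  | nil => intro x st; simp
  | cons y t ih =>
    intro x st
    rw [List.length_cons, List.range_succ_eq_map]
    simp only [List.foldl_cons, List.foldl_map, List.getD_cons_zero, List.getD_cons_succ,
      List.zip_cons_cons]
    exact ih y (pvStepA st (x, y))

-- A's inner loop over pyRange(1, len) with an Int accessor = fold of pvStepA over the zipped line
lemma pvInnerA (line : List String) (f : Int → String) (st : List Int × Int)
    (hf : ∀ k : Nat, k < line.length → f (k : Int) = line.getD k "") :
    (PySem.List.pyRange 1 (line.length : Int) 1).foldl
        (fun p j => pvStepA p (f (j - 1), f j)) st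
      = (line.zip line.tail).foldl pvStepA st := by
  cases line with
  | nil => simp [PySem.List.pyRange]
  | cons x t =>
    have h1 : ((x :: t).length : Int) = (1 : Int) + (t.length : Int) := by
      simp [List.length_cons]; omega
    rw [h1]
    have hsh := pvPyRange_shift 1 t.length
    simp only [Nat.cast_one] at hsh
    rw [hsh, List.foldl_map, List.tail_cons]
    rw [← pvFold_range_zip t x st]
    apply PySem.List.foldl_congr_mem
    intro acc k hk
    have hklt : k < t.length := List.mem_range.mp hk
    have e1 : ((1 + k : Nat) : Int) - 1 = ((k : Nat) : Int) := by push_cast; ring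
    have e2 : f ((1 + k : Nat) : Int) = (x :: t).getD (k + 1) "" := by
      rw [hf (1 + k) (by simp [List.length_cons]; omega)]
      congr 1; omega
    rw [e1, e2, hf k (by simp [List.length_cons]; omega)]

lemma pvA_eq (n : Nat) (rect : List (List String)) (_h1 : 1 ≤ n) (h2 : n ≤ rect.length)
    (h3 : ∀ r ∈ rect.take n, n ≤ r.length) :
    findMaxCnt (n : Int) rect
      = (PySem.List.max? ((pvRows n rect ++ pvCols n rect).flatMap pvRuns) (fun x => x)).getD 0 := by
  have hkr : ∀ k : Nat, k < n → k < rect.length := fun k hk => lt_of_lt_of_le hk h2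
  have hrowpass : ∀ init : List Int,
      (List.range n).foldl (fun acc (k : Nat) =>
        ((PySem.List.pyRange 1 (n : Int) 1).foldl (fun (p : List Int × Int) j =>
          if PySem.List.pyGetD (PySem.List.pyGetD rect (k : Int) []) j ""
              == PySem.List.pyGetD (PySem.List.pyGetD rect (k : Int) []) (j - 1) ""
          then (p.1, p.2 + 1) else (p.1 ++ [p.2], 1)) (acc, 1)).1 ++
        [((PySem.List.pyRange 1 (n : Int) 1).foldl (fun (p : List Int × Int) j =>
          if PySem.List.pyGetD (PySem.List.pyGetD rect (k : Int) []) j ""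
              == PySem.List.pyGetD (PySem.List.pyGetD rect (k : Int) []) (j - 1) ""
          then (p.1, p.2 + 1) else (p.1 ++ [p.2], 1)) (acc, 1)).2]) init
      = init ++ (pvRows n rect).flatMap pvRuns := by
    intro init
    have hcg : ∀ (acc : List Int), ∀ k ∈ List.range n,
        ((PySem.List.pyRange 1 (n : Int) 1).foldl (fun (p : List Int × Int) j =>
          if PySem.List.pyGetD (PySem.List.pyGetD rect (k : Int) []) j ""
              == PySem.List.pyGetD (PySem.List.pyGetD rect (k : Int) []) (j - 1) ""
          then (p.1, p.2 + 1) else (p.1 ++ [p.2], 1)) (acc, 1)).1 ++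
        [((PySem.List.pyRange 1 (n : Int) 1).foldl (fun (p : List Int × Int) j =>
          if PySem.List.pyGetD (PySem.List.pyGetD rect (k : Int) []) j ""
              == PySem.List.pyGetD (PySem.List.pyGetD rect (k : Int) []) (j - 1) ""
          then (p.1, p.2 + 1) else (p.1 ++ [p.2], 1)) (acc, 1)).2]
        = acc ++ pvRuns ((rect.getD k []).take n) := by
      intro acc k hk
      have hk' : k < n := List.mem_range.mp hk
      have hlen := pvLineRow_length n rect k h2 h3 hk'
      have hinner := pvInnerA ((rect.getD k []).take n)
        (fun j => PySem.List.pyGetD (PySem.List.pyGetD rect (k : Int) []) j "") (acc, 1)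
        (by
          intro m hm
          rw [hlen] at hm
          simp only [PySem.List.pyGetD_natCast]
          exact (pvGetD_take (rect.getD k []) n m "" hm).symm)
      rw [hlen] at hinner
      simp only [pvStepA] at hinner
      rw [hinner, pvStepA_acc]
      simp [pvRuns, pvRunsFrom, List.append_assoc]
    rw [PySem.List.foldl_congr_mem _ _ _ _ hcg, PySem.List.foldl_append_eq_flatMap]
    congr 1
    rw [← pvRangeRows n rect h2, List.flatMap_map]
  have hcolpass : ∀ init : List Int,
      (List.range n).foldl (fun acc (j : Nat) =>
        ((PySem.List.pyRange 1 (n : Int) 1).foldl (fun (p : List Int × Int) i =>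
          if PySem.List.pyGetD (PySem.List.pyGetD rect i []) (j : Int) ""
              == PySem.List.pyGetD (PySem.List.pyGetD rect (i - 1) []) (j : Int) ""
          then (p.1, p.2 + 1) else (p.1 ++ [p.2], 1)) (acc, 1)).1 ++
        [((PySem.List.pyRange 1 (n : Int) 1).foldl (fun (p : List Int × Int) i =>
          if PySem.List.pyGetD (PySem.List.pyGetD rect i []) (j : Int) ""
              == PySem.List.pyGetD (PySem.List.pyGetD rect (i - 1) []) (j : Int) ""
          then (p.1, p.2 + 1) else (p.1 ++ [p.2], 1)) (acc, 1)).2]) init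
      = init ++ (pvCols n rect).flatMap pvRuns := by
    intro init
    have hcg : ∀ (acc : List Int), ∀ j ∈ List.range n,
        ((PySem.List.pyRange 1 (n : Int) 1).foldl (fun (p : List Int × Int) i =>
          if PySem.List.pyGetD (PySem.List.pyGetD rect i []) (j : Int) ""
              == PySem.List.pyGetD (PySem.List.pyGetD rect (i - 1) []) (j : Int) ""
          then (p.1, p.2 + 1) else (p.1 ++ [p.2], 1)) (acc, 1)).1 ++
        [((PySem.List.pyRange 1 (n : Int) 1).foldl (fun (p : List Int × Int) i =>
          if PySem.List.pyGetD (PySem.List.pyGetD rect i []) (j : Int) ""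
              == PySem.List.pyGetD (PySem.List.pyGetD rect (i - 1) []) (j : Int) ""
          then (p.1, p.2 + 1) else (p.1 ++ [p.2], 1)) (acc, 1)).2]
        = acc ++ pvRuns ((pvRows n rect).map (fun r => r.getD j "")) := by
      intro acc j hj
      have hj' : j < n := List.mem_range.mp hj
      have hlen : ((pvRows n rect).map (fun r => r.getD j "")).length = n := by
        rw [List.length_map, pvRows_length n rect h2]
      have hinner := pvInnerA ((pvRows n rect).map (fun r => r.getD j ""))
        (fun i => PySem.List.pyGetD (PySem.List.pyGetD rect i []) (j : Int) "") (acc, 1)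
        (by
          intro m hm
          rw [hlen] at hm
          have hmr : m < rect.length := hkr m hm
          have hmrr : m < (pvRows n rect).length := by rw [pvRows_length n rect h2]; exact hm
          simp only [PySem.List.pyGetD_natCast]
          rw [pvGetD_map (fun r => r.getD j "") (pvRows n rect) m "" hmrr]
          have hrowm : (pvRows n rect)[m] = rect[m].take n := by
            simp [pvRows, List.getElem_take]
          rw [hrowm]
          have hjlen : j < rect[m].length := by
            have hmem : rect[m] ∈ rect.take n := by
              have : (rect.take n)[m]'(by simp; omega) = rect[m] := List.getElem_take
              rw [← this]
              exact List.getElem_mem _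
            have := h3 _ hmem
            omega
          rw [pvGetD_take rect[m] n j "" hj', pvGetD_getElem rect m [] hmr])
      rw [hlen] at hinner
      simp only [pvStepA] at hinner
      rw [hinner, pvStepA_acc]
      simp [pvRuns, pvRunsFrom, List.append_assoc]
    rw [PySem.List.foldl_congr_mem _ _ _ _ hcg, PySem.List.foldl_append_eq_flatMap]
    congr 1
    show (List.range n).flatMap (fun j => pvRuns ((pvRows n rect).map (fun r => r.getD j ""))) = _
    rw [pvCols, List.flatMap_map]
  simp only [findMaxCnt, PySem.List.pyRange_zero_natCast, List.foldl_map]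
  rw [hrowpass [], hcolpass ([] ++ (pvRows n rect).flatMap pvRuns), List.flatMap_append]
  simp

-- ===== VERDICT (by name: the statement is the Claim_ definition above) =====
theorem findMaxCnt_spec : Claim_equal_findMaxCnt := by
  intro N rect _ hpre
  obtain ⟨hN1, hN2, hN3⟩ := hpre
  obtain ⟨n, rfl⟩ : ∃ n : Nat, N = (n : Int) := ⟨N.toNat, (Int.toNat_of_nonneg (by omega)).symm⟩
  have h1 : 1 ≤ n := by exact_mod_cast hN1
  have h2 : n ≤ rect.length := by exact_mod_cast hN2
  have h3 : ∀ r ∈ rect.take n, n ≤ r.length := by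
    intro r hr
    have hr' : r ∈ rect.take ((n : Int)).toNat := by simpa using hr
    have := hN3 r hr'
    exact_mod_cast this
  show findMaxCnt (n : Int) rect = findMaxCnt_alt (n : Int) rect
  rw [pvA_eq n rect h1 h2 h3, pvAlt_eq n rect h1 h2 h3]
  apply pvFinal
  intro hc
  have := pvRows_ne_nil n rect h1 h2
  exact this (by simpa using List.append_eq_nil_iff.mp hc |>.1)
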